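-- pv_equiv track=rewrite | github.com/ConductionNL/content-bot | src/conduction_content_bot/prompts.py | detect_page_key
-- ===== SOURCE A (Python) =====
-- from typing import Dict, List, Optional
--
-- KEYWORD_TO_PAGE: Dict[str, str] = {
--     "over ons": "OVER_ONS",
--     "overons": "OVER_ONS",
--     "beheer": "BEHEER",
--     "managed": "BEHEER",
--     "projecten": "PROJECTEN",
--     "project": "PROJECTEN",
--     "common ground": "COMMON_GROUND",
--     "commonground": "COMMON_GROUND",
--     "trainingen": "TRAININGEN",
--     "training": "TRAININGEN",
--     "linkedin": "LINKEDIN",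
--     "linkedin post": "LINKEDIN",
--     "post": "LINKEDIN",
--     "home": "HOME",
-- }
--
-- def detect_page_key(user_text: str) -> Optional[str]:
--     """
--     Detect the canonical page key from user-provided text.
--
--     @param user_text: Raw user text possibly containing a known keyword.
--     @returns: Matching page key or None if not found.
--     """
--     text = (user_text or "").strip().lower()
--     if not text:
--         return None
--     # Zoek naar de langste match (zodat 'linkedin post' boven 'linkedin' gaat)
--     candidates: List[str] = sorted(KEYWORD_TO_PAGE.keys(), key=lambda k: -len(k))
--     for keyword in candidates:
--         if keyword in text:
--             return KEYWORD_TO_PAGE[keyword]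
--     return None
-- ===== SOURCE B (Python) =====
-- from typing import Dict, List, Optional
--
-- KEYWORD_TO_PAGE: Dict[str, str] = {
--     "over ons": "OVER_ONS",
--     "overons": "OVER_ONS",
--     "beheer": "BEHEER",
--     "managed": "BEHEER",
--     "projecten": "PROJECTEN",
--     "project": "PROJECTEN",
--     "common ground": "COMMON_GROUND",
--     "commonground": "COMMON_GROUND",
--     "trainingen": "TRAININGEN",
--     "training": "TRAININGEN",
--     "linkedin": "LINKEDIN",
--     "linkedin post": "LINKEDIN",
--     "post": "LINKEDIN",
--     "home": "HOME",
-- }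
--
-- def detect_page_key(user_text: str) -> Optional[str]:
--     text = (user_text or "").strip().lower()
--     if not text:
--         return None
--     best_len = -1
--     best_value = None
--     for keyword, value in KEYWORD_TO_PAGE.items():
--         if keyword in text and len(keyword) > best_len:
--             best_len = len(keyword)
--             best_value = value
--     return best_value
-- ===== Notes on version B (the rewrite author's own statement) =====
-- stated objective: simpler
-- what changed: B drops the sort-then-first-match scan and instead makes a single max-tracking pass over the dict items, keeping the longest matching keyword (first wins on ties via strict >).
import Mathlib
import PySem

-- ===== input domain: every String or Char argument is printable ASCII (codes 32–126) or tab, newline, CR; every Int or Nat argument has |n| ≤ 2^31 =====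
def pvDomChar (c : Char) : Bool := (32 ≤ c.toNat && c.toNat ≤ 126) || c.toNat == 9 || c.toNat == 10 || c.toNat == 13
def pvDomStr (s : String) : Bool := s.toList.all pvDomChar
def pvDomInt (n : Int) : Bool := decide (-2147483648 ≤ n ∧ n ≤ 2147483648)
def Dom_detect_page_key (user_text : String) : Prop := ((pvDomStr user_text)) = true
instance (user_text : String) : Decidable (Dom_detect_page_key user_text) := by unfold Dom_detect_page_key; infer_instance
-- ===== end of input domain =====

-- B replaces A's sort-then-first-match with a single max-tracking pass over the dict; same result, no sort.

-- ===== PORT A =====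
def KEYWORD_TO_PAGE : PySem.Dict String String := PySem.Dict.ofList
  [("over ons", "OVER_ONS"), ("overons", "OVER_ONS"), ("beheer", "BEHEER"),
   ("managed", "BEHEER"), ("projecten", "PROJECTEN"), ("project", "PROJECTEN"),
   ("common ground", "COMMON_GROUND"), ("commonground", "COMMON_GROUND"),
   ("trainingen", "TRAININGEN"), ("training", "TRAININGEN"),
   ("linkedin", "LINKEDIN"), ("linkedin post", "LINKEDIN"),
   ("post", "LINKEDIN"), ("home", "HOME")]

-- the 'for keyword in candidates: if keyword in text: return KEYWORD_TO_PAGE[keyword]' loop;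
-- KEYWORD_TO_PAGE[keyword] ported as get? — exact here since keyword is drawn from the dict's own keys
def pvLoopA (text : String) : List String → Option String
  | [] => none
  | k :: rest => if PySem.Str.isIn k text then KEYWORD_TO_PAGE.get? k else pvLoopA text rest

def detect_page_key (user_text : String) : Option String :=
  let text := PySem.Str.lower (PySem.Str.strip user_text)
  if text == "" then none
  else pvLoopA text (PySem.List.sorted KEYWORD_TO_PAGE.keys (fun k => -(PySem.Str.len k : Int)) false)

-- ===== PORT B =====
def pvStepB (text : String) (best : Int × Option String) (kv : String × String) : Int × Option String :=
  if PySem.Str.isIn kv.1 text && decide ((PySem.Str.len kv.1 : Int) > best.1) then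
    ((PySem.Str.len kv.1 : Int), some kv.2)
  else best

def detect_page_key_alt (user_text : String) : Option String :=
  let text := PySem.Str.lower (PySem.Str.strip user_text)
  if text == "" then none
  else (KEYWORD_TO_PAGE.items.foldl (pvStepB text) (-1, none)).2

-- ===== PRECONDITION & SPEC =====
def Spec_detect_page_key (user_text : String) (out : Option String) : Prop := out = detect_page_key_alt user_text
instance (user_text : String) (out : Option String) : Decidable (Spec_detect_page_key user_text out) := by unfold Spec_detect_page_key; infer_instance

-- ===== CLAIM (what is proved, stated in full; the proofs are below) =====
def Claim_equal_detect_page_key : Prop := ∀ (user_text : String), Dom_detect_page_key user_text → Spec_detect_page_key user_text (detect_page_key user_text)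

-- ===== LEMMAS AND PROOFS =====

-- proof-only abstractions: the two control structures over 14 bools, outputs encoded as small Nats
def pvOut (n : Nat) : Option String :=
  if n = 1 then some "OVER_ONS" else if n = 2 then some "BEHEER" else if n = 3 then some "PROJECTEN" else if n = 4 then some "COMMON_GROUND" else if n = 5 then some "TRAININGEN" else if n = 7 then some "LINKEDIN" else if n = 8 then some "HOME" else none

def pvAn (c1 c2 c3 c4 c5 c6 c7 c8 c9 c10 c11 c12 c13 c14 : Bool) : Nat :=
  if c1 then 4 else if c2 then 7 else if c3 then 4 else if c4 then 5 else if c5 then 3 else if c6 then 1 else if c7 then 5 else if c8 then 7 else if c9 then 1 else if c10 then 2 else if c11 then 3 else if c12 then 2 else if c13 then 7 else if c14 then 8 else 0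

def pvStepN (b : Bool) (n v : Nat) (best : Nat × Nat) : Nat × Nat :=
  if b && decide (n > best.1) then (n, v) else best

def pvBn (c6 c9 c12 c10 c5 c11 c1 c3 c4 c7 c8 c2 c13 c14 : Bool) : Nat × Nat :=
  pvStepN c14 5 8 <| pvStepN c13 5 7 <| pvStepN c2 14 7 <| pvStepN c8 9 7 <| pvStepN c7 9 5 <| pvStepN c4 11 5 <| pvStepN c3 13 4 <| pvStepN c1 14 4 <| pvStepN c11 8 3 <| pvStepN c5 10 3 <| pvStepN c10 8 2 <| pvStepN c12 7 2 <| pvStepN c9 8 1 <| pvStepN c6 9 1 (0, 0)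

set_option maxHeartbeats 4000000 in
theorem pv_bools : ∀ (c1 c2 c3 c4 c5 c6 c7 c8 c9 c10 c11 c12 c13 c14 : Bool),
    pvAn c1 c2 c3 c4 c5 c6 c7 c8 c9 c10 c11 c12 c13 c14 = (pvBn c6 c9 c12 c10 c5 c11 c1 c3 c4 c7 c8 c2 c13 c14).2 := by decide

theorem pv_step (text k v : String) (n' v' : Nat) (s : Int × Option String) (t : Nat × Nat)
    (H : s.1 = (t.1 : Int) - 1 ∧ s.2 = pvOut t.2)
    (hn : (n' : Int) = (PySem.Str.len k : Int) + 1) (hv : pvOut v' = some v) :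
    (pvStepB text s (k, v)).1 = ((pvStepN (PySem.Str.isIn k text) n' v' t).1 : Int) - 1 ∧
    (pvStepB text s (k, v)).2 = pvOut (pvStepN (PySem.Str.isIn k text) n' v' t).2 := by
  obtain ⟨h1, h2⟩ := H
  have hc : decide ((PySem.Str.len k : Int) > s.1) = decide ((n' : Nat) > t.1) := by
    by_cases h : (PySem.Str.len k : Int) > s.1 <;> [rw [decide_eq_true h]; rw [decide_eq_false h]] <;>
      [exact (decide_eq_true (by omega)).symm; exact (decide_eq_false (by omega)).symm]
  unfold pvStepB pvStepN
  rw [hc]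
  by_cases hb : (PySem.Str.isIn k text && decide ((n' : Nat) > t.1)) = true
  · simp only [hb, if_true]
    exact ⟨by omega, hv.symm⟩
  · simp only [Bool.not_eq_true] at hb
    simp only [hb, Bool.false_eq_true, if_false]
    exact ⟨h1, h2⟩

theorem pv_core (text : String) :
    pvLoopA text (PySem.List.sorted KEYWORD_TO_PAGE.keys (fun k => -(PySem.Str.len k : Int)) false)
      = (KEYWORD_TO_PAGE.items.foldl (pvStepB text) (-1, none)).2 := by
  have hs : PySem.List.sorted KEYWORD_TO_PAGE.keys (fun k => -(PySem.Str.len k : Int)) false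
      = ["common ground", "linkedin post", "commonground", "trainingen", "projecten", "over ons", "training", "linkedin", "overons", "managed", "project", "beheer", "post", "home"] := by decide
  have hi : KEYWORD_TO_PAGE.items
      = [("over ons", "OVER_ONS"), ("overons", "OVER_ONS"), ("beheer", "BEHEER"), ("managed", "BEHEER"), ("projecten", "PROJECTEN"), ("project", "PROJECTEN"), ("common ground", "COMMON_GROUND"), ("commonground", "COMMON_GROUND"), ("trainingen", "TRAININGEN"), ("training", "TRAININGEN"), ("linkedin", "LINKEDIN"), ("linkedin post", "LINKEDIN"), ("post", "LINKEDIN"), ("home", "HOME")] := by decide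
  rw [hs, hi]
  have hA : pvLoopA text ["common ground", "linkedin post", "commonground", "trainingen", "projecten", "over ons", "training", "linkedin", "overons", "managed", "project", "beheer", "post", "home"]
      = pvOut (pvAn (PySem.Str.isIn "common ground" text) (PySem.Str.isIn "linkedin post" text) (PySem.Str.isIn "commonground" text) (PySem.Str.isIn "trainingen" text) (PySem.Str.isIn "projecten" text) (PySem.Str.isIn "over ons" text) (PySem.Str.isIn "training" text) (PySem.Str.isIn "linkedin" text) (PySem.Str.isIn "overons" text) (PySem.Str.isIn "managed" text) (PySem.Str.isIn "project" text) (PySem.Str.isIn "beheer" text) (PySem.Str.isIn "post" text) (PySem.Str.isIn "home" text)) := by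
    have g0 : KEYWORD_TO_PAGE.get? "common ground" = some "COMMON_GROUND" := by decide
    have g1 : KEYWORD_TO_PAGE.get? "linkedin post" = some "LINKEDIN" := by decide
    have g2 : KEYWORD_TO_PAGE.get? "commonground" = some "COMMON_GROUND" := by decide
    have g3 : KEYWORD_TO_PAGE.get? "trainingen" = some "TRAININGEN" := by decide
    have g4 : KEYWORD_TO_PAGE.get? "projecten" = some "PROJECTEN" := by decide
    have g5 : KEYWORD_TO_PAGE.get? "over ons" = some "OVER_ONS" := by decide
    have g6 : KEYWORD_TO_PAGE.get? "training" = some "TRAININGEN" := by decide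
    have g7 : KEYWORD_TO_PAGE.get? "linkedin" = some "LINKEDIN" := by decide
    have g8 : KEYWORD_TO_PAGE.get? "overons" = some "OVER_ONS" := by decide
    have g9 : KEYWORD_TO_PAGE.get? "managed" = some "BEHEER" := by decide
    have g10 : KEYWORD_TO_PAGE.get? "project" = some "PROJECTEN" := by decide
    have g11 : KEYWORD_TO_PAGE.get? "beheer" = some "BEHEER" := by decide
    have g12 : KEYWORD_TO_PAGE.get? "post" = some "LINKEDIN" := by decide
    have g13 : KEYWORD_TO_PAGE.get? "home" = some "HOME" := by decide
    simp only [pvLoopA, pvAn, apply_ite pvOut, g0, g1, g2, g3, g4, g5, g6, g7, g8, g9, g10, g11, g12, g13]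
    norm_num [pvOut]
    rfl
  have hB0 : ((-1 : Int), (none : Option String)).1 = (((0 : Nat), (0 : Nat)).1 : Int) - 1 ∧ ((-1 : Int), (none : Option String)).2 = pvOut ((0 : Nat), (0 : Nat)).2 := ⟨by norm_num, rfl⟩
  have hB1 := pv_step text "over ons" "OVER_ONS" 9 1 _ _ hB0 (by decide) (by decide)
  have hB2 := pv_step text "overons" "OVER_ONS" 8 1 _ _ hB1 (by decide) (by decide)
  have hB3 := pv_step text "beheer" "BEHEER" 7 2 _ _ hB2 (by decide) (by decide)
  have hB4 := pv_step text "managed" "BEHEER" 8 2 _ _ hB3 (by decide) (by decide)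
  have hB5 := pv_step text "projecten" "PROJECTEN" 10 3 _ _ hB4 (by decide) (by decide)
  have hB6 := pv_step text "project" "PROJECTEN" 8 3 _ _ hB5 (by decide) (by decide)
  have hB7 := pv_step text "common ground" "COMMON_GROUND" 14 4 _ _ hB6 (by decide) (by decide)
  have hB8 := pv_step text "commonground" "COMMON_GROUND" 13 4 _ _ hB7 (by decide) (by decide)
  have hB9 := pv_step text "trainingen" "TRAININGEN" 11 5 _ _ hB8 (by decide) (by decide)
  have hB10 := pv_step text "training" "TRAININGEN" 9 5 _ _ hB9 (by decide) (by decide)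
  have hB11 := pv_step text "linkedin" "LINKEDIN" 9 7 _ _ hB10 (by decide) (by decide)
  have hB12 := pv_step text "linkedin post" "LINKEDIN" 14 7 _ _ hB11 (by decide) (by decide)
  have hB13 := pv_step text "post" "LINKEDIN" 5 7 _ _ hB12 (by decide) (by decide)
  have hB14 := pv_step text "home" "HOME" 5 8 _ _ hB13 (by decide) (by decide)
  rw [hA]
  simp only [List.foldl]
  rw [hB14.2]
  exact congrArg pvOut (pv_bools (PySem.Str.isIn "common ground" text) (PySem.Str.isIn "linkedin post" text) (PySem.Str.isIn "commonground" text) (PySem.Str.isIn "trainingen" text) (PySem.Str.isIn "projecten" text) (PySem.Str.isIn "over ons" text) (PySem.Str.isIn "training" text) (PySem.Str.isIn "linkedin" text) (PySem.Str.isIn "overons" text) (PySem.Str.isIn "managed" text) (PySem.Str.isIn "project" text) (PySem.Str.isIn "beheer" text) (PySem.Str.isIn "post" text) (PySem.Str.isIn "home" text))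

-- ===== VERDICT (by name: the statement is the Claim_ definition above) =====
theorem detect_page_key_spec : Claim_equal_detect_page_key := by
  intro user_text _
  unfold Spec_detect_page_key detect_page_key detect_page_key_alt
  by_cases h : (PySem.Str.lower (PySem.Str.strip user_text)) == ""
  · simp [h]
  · simp only [h, Bool.false_eq_true, ite_false]
    exact pv_core _
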